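-- pv_equiv track=rewrite | github.com/ndmccarthy/MSDS_Coursework | Data_Structures_and_Algorithms/rod_adding_problem.py | findOptimalJoiningCost
-- ===== SOURCE A (Python) =====
-- import heapq
--
-- def findOptimalJoiningCost(lengths: list):
--     # initialize cost counter
--     cost = 0
--     # make the lengths list into a heap
--     heapq.heapify(lengths)
--     # work through the heap until there is one item left
--     while len(lengths) > 1:
--         # extract the minumum item from the heap (twice)
--         rod1 = heapq.heappop(lengths)
--         rod2 = heapq.heappop(lengths)
--         # add the items together, then add their sum to the cost and insert the sum back into the heap
--         new_rod = rod1 + rod2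
--         cost += new_rod
--         heapq.heappush(lengths, new_rod)
--     return cost
-- ===== SOURCE B (Python) =====
-- def findOptimalJoiningCost(lengths: list):
--     # Keep the rods as an in-place sorted list instead of a heap; each round
--     # pops the two smallest from the front and inserts their sum back in order.
--     cost = 0
--     lengths.sort()
--     while len(lengths) > 1:
--         new_rod = lengths.pop(0) + lengths.pop(0)
--         cost += new_rod
--         i = 0
--         while i < len(lengths) and lengths[i] < new_rod:
--             i += 1
--         lengths.insert(i, new_rod)
--     return cost
-- ===== Notes on version B (the rewrite author's own statement) =====
-- stated objective: simpler
-- what changed: Replaces the heapq binary heap with a plain in-place sorted list: pop the two front (smallest) elements each round and insert their sum back at its sorted position by a linear scan.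
import Mathlib
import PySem

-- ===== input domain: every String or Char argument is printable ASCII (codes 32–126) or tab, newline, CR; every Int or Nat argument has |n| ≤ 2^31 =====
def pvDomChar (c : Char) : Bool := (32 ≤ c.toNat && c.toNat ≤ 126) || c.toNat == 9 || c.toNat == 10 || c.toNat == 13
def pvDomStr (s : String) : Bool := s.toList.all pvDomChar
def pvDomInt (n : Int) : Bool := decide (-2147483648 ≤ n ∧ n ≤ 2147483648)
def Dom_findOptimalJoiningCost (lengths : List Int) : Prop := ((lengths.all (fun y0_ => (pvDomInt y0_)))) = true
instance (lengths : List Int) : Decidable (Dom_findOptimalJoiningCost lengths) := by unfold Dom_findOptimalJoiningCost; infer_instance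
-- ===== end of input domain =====

-- B drops the heapq heap for an in-place sorted list (pop two front elements, insert the sum
-- back in order); objective: simpler. Both versions mutate the argument list in place; the
-- equivalence proved here is about the RETURN value only (the final lists hold the same
-- multiset of rods but may be arranged differently: heap order vs sorted order).

-- ===== PORT A =====
-- heapq is modelled by its specification: heappop returns (and removes) the minimum of the
-- list, heappush adds its argument; heapify only rearranges the list (invisible to the
-- returned cost, which depends only on the multiset of rods).
def aGo (l : List Int) (cost : Int) : Int :=
  if h : 1 < l.length then
    -- rod1 = heappop(lengths); rod2 = heappop(lengths)  (pop = remove the minimum;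
    -- the .getD defaults are unreachable: the list has at least two elements here)
    let rod1 := (PySem.List.min? l (fun x => x)).getD 0
    let l1 := (PySem.List.remove? l rod1).getD []
    let rod2 := (PySem.List.min? l1 (fun x => x)).getD 0
    let l2 := (PySem.List.remove? l1 rod2).getD []
    -- new_rod = rod1 + rod2; cost += new_rod; heappush(lengths, new_rod)
    aGo (l2 ++ [rod1 + rod2]) (cost + (rod1 + rod2))
  else cost
termination_by l.length
decreasing_by
  show (l2 ++ [rod1 + rod2]).length < l.length
  have hne : l ≠ [] := by intro he; subst he; simp at h
  obtain ⟨m, hm⟩ : ∃ m, PySem.List.min? l (fun x => x) = some m := by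
    cases he : PySem.List.min? l (fun x => x) with
    | none => exact absurd ((PySem.List.min?_eq_none_iff _ _).mp he) hne
    | some m => exact ⟨m, rfl⟩
  have hmem := PySem.List.min?_mem hm
  have hr := PySem.List.remove?_eq_some_erase l rod1 (by simp only [rod1, hm, Option.getD_some]; exact hmem)
  have hl1 : l1 = l.erase rod1 := by simp [l1, hr]
  have hlen1 : l1.length = l.length - 1 := by
    rw [hl1]; exact List.length_erase_of_mem (by simp only [rod1, hm, Option.getD_some]; exact hmem)
  have hne1 : l1 ≠ [] := by intro he; rw [he] at hlen1; simp at hlen1; omega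
  obtain ⟨m2, hm2⟩ : ∃ m2, PySem.List.min? l1 (fun x => x) = some m2 := by
    cases he : PySem.List.min? l1 (fun x => x) with
    | none => exact absurd ((PySem.List.min?_eq_none_iff _ _).mp he) hne1
    | some m2 => exact ⟨m2, rfl⟩
  have hmem2 := PySem.List.min?_mem hm2
  have hr2 := PySem.List.remove?_eq_some_erase l1 rod2 (by simp only [rod2, hm2, Option.getD_some]; exact hmem2)
  have hlen2 : l2.length = l1.length - 1 := by
    simp only [l2, hr2, Option.getD_some]
    exact List.length_erase_of_mem (by simp only [rod2, hm2, Option.getD_some]; exact hmem2)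
  simp only [List.length_append, List.length_cons, List.length_nil]
  omega

def findOptimalJoiningCost (lengths : List Int) : Int := aGo lengths 0

-- ===== PORT B =====
-- insert s into a sorted list: skip the elements < s (B's inner scan), put s there
def bIns (s : Int) (l : List Int) : List Int :=
  l.takeWhile (· < s) ++ s :: l.dropWhile (· < s)

def bGo (l : List Int) (cost : Int) : Int :=
  match l with
  | a :: b :: rest => bGo (bIns (a + b) rest) (cost + (a + b))
  | _ => cost
termination_by l.length
decreasing_by
  have h : (bIns (a + b) rest).length = rest.length + 1 := by
    unfold bIns
    have := congrArg List.length
      (List.takeWhile_append_dropWhile (p := fun x : Int => decide (x < a + b)) (l := rest))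
    simp only [List.length_append, List.length_cons] at this ⊢
    omega
  simp [h]

def findOptimalJoiningCost_alt (lengths : List Int) : Int :=
  bGo (PySem.List.sorted lengths (fun x => x) false) 0

-- ===== PRECONDITION & SPEC =====
def Spec_findOptimalJoiningCost (lengths : List Int) (out : Int) : Prop := out = findOptimalJoiningCost_alt lengths
instance (lengths : List Int) (out : Int) : Decidable (Spec_findOptimalJoiningCost lengths out) := by unfold Spec_findOptimalJoiningCost; infer_instance

-- ===== CLAIM (what is proved, stated in full; the proofs are below) =====
def Claim_equal_findOptimalJoiningCost : Prop := ∀ (lengths : List Int), Dom_findOptimalJoiningCost lengths → Spec_findOptimalJoiningCost lengths (findOptimalJoiningCost lengths)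

-- ===== LEMMAS AND PROOFS =====

-- min? with the identity key returns the minimum value, so it is permutation-invariant
theorem min?_id_perm {l l' : List Int} (hp : l.Perm l') :
    PySem.List.min? l (fun x => x) = PySem.List.min? l' (fun x => x) := by
  cases hm : PySem.List.min? l (fun x => x) with
  | none =>
      rw [PySem.List.min?_eq_none_iff] at hm
      subst hm
      rw [List.perm_nil.mp hp.symm]
      simp [PySem.List.min?]
  | some m =>
      cases hm' : PySem.List.min? l' (fun x => x) with
      | none =>
          rw [PySem.List.min?_eq_none_iff] at hm'
          subst hm'
          rw [List.perm_nil.mp hp] at hm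
          simp [PySem.List.min?] at hm
      | some m' =>
          have hmem := PySem.List.min?_mem hm
          have hmem' := PySem.List.min?_mem hm'
          have h1 := PySem.List.min?_isMin hm m' (hp.mem_iff.mpr hmem')
          have h2 := PySem.List.min?_isMin hm' m (hp.symm.mem_iff.mpr hmem)
          simp at h1 h2 ⊢
          omega

-- the cost computed by A's loop depends only on the multiset of rods
theorem aGo_perm (n : Nat) :
    ∀ (l l' : List Int) (c : Int), l.length ≤ n → l.Perm l' → aGo l c = aGo l' c := by
  induction n with
  | zero =>
      intro l l' c hn hp
      have : l = [] := List.length_eq_zero_iff.mp (Nat.le_zero.mp hn)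
      subst this
      rw [List.perm_nil.mp hp.symm]
  | succ n ih =>
      intro l l' c hn hp
      have hlen := hp.length_eq
      by_cases h : 1 < l.length
      · have h' : 1 < l'.length := by omega
        conv_lhs => rw [aGo.eq_def]
        conv_rhs => rw [aGo.eq_def]
        rw [dif_pos h, dif_pos h']
        have hne : l ≠ [] := by intro he; subst he; simp at h
        obtain ⟨m, hm⟩ : ∃ m, PySem.List.min? l (fun x => x) = some m := by
          cases he : PySem.List.min? l (fun x => x) with
          | none => exact absurd ((PySem.List.min?_eq_none_iff _ _).mp he) hne
          | some m => exact ⟨m, rfl⟩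
        have hm' : PySem.List.min? l' (fun x => x) = some m := (min?_id_perm hp).symm.trans hm
        have hmem := PySem.List.min?_mem hm
        have hmem' := PySem.List.min?_mem hm'
        have hr : PySem.List.remove? l m = some (l.erase m) :=
          PySem.List.remove?_eq_some_erase l m hmem
        have hr' : PySem.List.remove? l' m = some (l'.erase m) :=
          PySem.List.remove?_eq_some_erase l' m hmem'
        have hp1 : (l.erase m).Perm (l'.erase m) := hp.erase m
        have hlen1 : (l.erase m).length = l.length - 1 := List.length_erase_of_mem hmem
        have hne1 : l.erase m ≠ [] := by
          intro he
          rw [he] at hlen1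
          simp at hlen1
          omega
        obtain ⟨m2, hm2⟩ : ∃ m2, PySem.List.min? (l.erase m) (fun x => x) = some m2 := by
          cases he : PySem.List.min? (l.erase m) (fun x => x) with
          | none => exact absurd ((PySem.List.min?_eq_none_iff _ _).mp he) hne1
          | some m2 => exact ⟨m2, rfl⟩
        have hm2' : PySem.List.min? (l'.erase m) (fun x => x) = some m2 :=
          (min?_id_perm hp1).symm.trans hm2
        have hmem2 := PySem.List.min?_mem hm2
        have hmem2' := PySem.List.min?_mem hm2'
        have hr2 : PySem.List.remove? (l.erase m) m2 = some ((l.erase m).erase m2) :=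
          PySem.List.remove?_eq_some_erase (l.erase m) m2 hmem2
        have hr2' : PySem.List.remove? (l'.erase m) m2 = some ((l'.erase m).erase m2) :=
          PySem.List.remove?_eq_some_erase (l'.erase m) m2 hmem2'
        simp only [hm, hm', hr, hr', Option.getD_some, hm2, hm2', hr2, hr2']
        have hp2 : ((l.erase m).erase m2).Perm ((l'.erase m).erase m2) := hp1.erase m2
        have hlen2 : ((l.erase m).erase m2).length = (l.erase m).length - 1 :=
          List.length_erase_of_mem hmem2
        exact ih _ _ _ (by simp only [List.length_append, List.length_cons,
          List.length_nil]; omega) (hp2.append_right [m + m2])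
      · have h' : ¬ 1 < l'.length := by omega
        conv_lhs => rw [aGo.eq_def]
        conv_rhs => rw [aGo.eq_def]
        rw [dif_neg h, dif_neg h']

theorem foldl_min_of_min (x : Int) (t : List Int) (h : ∀ y ∈ t, x ≤ y) :
    t.foldl min x = x := by
  induction t with
  | nil => rfl
  | cons b t ih =>
      have hb : x ≤ b := h b (by simp)
      simp only [List.foldl_cons, min_eq_left hb]
      exact ih (fun y hy => h y (by simp [hy]))

theorem min?_sorted_head (a : Int) (t : List Int) (h : ∀ y ∈ t, a ≤ y) :
    PySem.List.min? (a :: t) (fun x => x) = some a := by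
  rw [PySem.List.min?_id_cons, foldl_min_of_min a t h]

theorem bIns_perm (s : Int) (l : List Int) : (bIns s l).Perm (l ++ [s]) := by
  unfold bIns
  have h1 : (List.takeWhile (fun x : Int => decide (x < s)) l
      ++ s :: List.dropWhile (fun x : Int => decide (x < s)) l).Perm (s :: l) := by
    have h := List.perm_middle (a := s)
      (l₁ := List.takeWhile (fun x : Int => decide (x < s)) l)
      (l₂ := List.dropWhile (fun x : Int => decide (x < s)) l)
    rwa [List.takeWhile_append_dropWhile] at h
  exact h1.trans (List.perm_append_singleton s l).symm

theorem mem_bIns {y s : Int} {l : List Int} (hy : y ∈ bIns s l) : y = s ∨ y ∈ l := by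
  have h := (bIns_perm s l).mem_iff.mp hy
  simp at h
  tauto

theorem bIns_sorted (s : Int) (l : List Int) (h : l.Pairwise (· ≤ ·)) :
    (bIns s l).Pairwise (· ≤ ·) := by
  induction l with
  | nil => simp [bIns]
  | cons a t ih =>
      rcases List.pairwise_cons.mp h with ⟨ha, ht⟩
      by_cases hc : a < s
      · have he : bIns s (a :: t) = a :: bIns s t := by
          simp [bIns, hc]
        rw [he]
        refine List.pairwise_cons.mpr ⟨?_, ih ht⟩
        intro y hy
        rcases mem_bIns hy with rfl | hyt
        · omega
        · exact ha y hyt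
      · have he : bIns s (a :: t) = s :: a :: t := by
          simp [bIns, hc]
        rw [he]
        refine List.pairwise_cons.mpr ⟨?_, h⟩
        intro y hy
        rcases List.mem_cons.mp hy with rfl | hyt
        · omega
        · have := ha y hyt; omega

-- on a sorted list, A's min-extraction loop is exactly B's front-pop loop
theorem aGo_eq_bGo (n : Nat) :
    ∀ (l : List Int) (c : Int), l.length ≤ n → l.Pairwise (· ≤ ·) → aGo l c = bGo l c := by
  induction n with
  | zero =>
      intro l c hn _
      have : l = [] := List.length_eq_zero_iff.mp (Nat.le_zero.mp hn)
      subst this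
      rw [aGo.eq_def, bGo.eq_def]
      simp
  | succ n ih =>
      intro l c hn hs
      match l with
      | [] => rw [aGo.eq_def, bGo.eq_def]; simp
      | [a] => rw [aGo.eq_def, bGo.eq_def]; simp
      | a :: b :: rest =>
          rcases List.pairwise_cons.mp hs with ⟨ha, hs1⟩
          rcases List.pairwise_cons.mp hs1 with ⟨hb, hs2⟩
          rw [aGo.eq_def]
          have hlen : 1 < (a :: b :: rest).length := by simp
          rw [dif_pos hlen]
          simp only [min?_sorted_head a (b :: rest) ha, Option.getD_some,
            PySem.List.remove?_cons_self, min?_sorted_head b rest hb]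
          have hperm : (rest ++ [a + b]).Perm (bIns (a + b) rest) := (bIns_perm (a + b) rest).symm
          calc aGo (rest ++ [a + b]) (c + (a + b))
              = aGo (bIns (a + b) rest) (c + (a + b)) :=
                aGo_perm (rest.length + 1) _ _ _ (by simp) hperm
            _ = bGo (bIns (a + b) rest) (c + (a + b)) := by
                apply ih _ _ ?_ (bIns_sorted _ _ hs2)
                rw [hperm.symm.length_eq]
                simp only [List.length_append, List.length_cons, List.length_nil] at hn ⊢
                omega
            _ = bGo (a :: b :: rest) c := by conv_rhs => rw [bGo.eq_def]

-- ===== VERDICT (by name: the statement is the Claim_ definition above) =====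
theorem findOptimalJoiningCost_spec : Claim_equal_findOptimalJoiningCost := by
  intro lengths _
  unfold Spec_findOptimalJoiningCost findOptimalJoiningCost findOptimalJoiningCost_alt
  have hp : lengths.Perm (PySem.List.sorted lengths (fun x => x) false) :=
    (PySem.List.sorted_perm lengths (fun x => x) false).symm
  rw [aGo_perm lengths.length _ _ 0 (le_refl _) hp]
  exact aGo_eq_bGo (PySem.List.sorted lengths (fun x => x) false).length _ 0 (le_refl _)
    (by simpa using PySem.List.sorted_pairwise lengths (fun x => x))
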